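-- pv_equiv track=rewrite | github.com/victor-luu191/hacker_rank_train | medium/queen_atk.py | find_upper_part
-- ===== SOURCE A (Python) =====
-- def find_upper_part(cell, lower_left_boundary, upper_right_boundary, diag):
--     # stop when the cell hits upper OR left/right boundary (if diag=1/diag=2)
--     r, c = cell[0], cell[1]
--     if diag == 1:
--         if r == upper_right_boundary or c == lower_left_boundary:
--             return []
--         upper_cell = [r + 1, c - 1]
--         return [upper_cell] + find_upper_part(upper_cell, lower_left_boundary, upper_right_boundary, diag)
--     if diag == 2:
--         if r == upper_right_boundary or c == upper_right_boundary:
--             return []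
--         upper_cell = [r + 1, c + 1]
--         return [upper_cell] + find_upper_part(upper_cell, lower_left_boundary, upper_right_boundary, diag)
-- ===== SOURCE B (Python) =====
-- def find_upper_part(cell, lower_left_boundary, upper_right_boundary, diag):
--     # iterative version: walk up the diagonal, appending cells until a boundary is hit
--     r, c = cell[0], cell[1]
--     if diag == 1:
--         res = []
--         while r != upper_right_boundary and c != lower_left_boundary:
--             r, c = r + 1, c - 1
--             res.append([r, c])
--         return res
--     if diag == 2:
--         res = []
--         while r != upper_right_boundary and c != upper_right_boundary:
--             r, c = r + 1, c + 1
--             res.append([r, c])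
--         return res
-- ===== Notes on version B (the rewrite author's own statement) =====
-- stated objective: simpler
-- what changed: Replaced the recursion (list built by repeated front-concatenation on return) with an iterative while loop that appends to one accumulator list; the implicit None for diag not in {1,2} is kept.
import Mathlib
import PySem

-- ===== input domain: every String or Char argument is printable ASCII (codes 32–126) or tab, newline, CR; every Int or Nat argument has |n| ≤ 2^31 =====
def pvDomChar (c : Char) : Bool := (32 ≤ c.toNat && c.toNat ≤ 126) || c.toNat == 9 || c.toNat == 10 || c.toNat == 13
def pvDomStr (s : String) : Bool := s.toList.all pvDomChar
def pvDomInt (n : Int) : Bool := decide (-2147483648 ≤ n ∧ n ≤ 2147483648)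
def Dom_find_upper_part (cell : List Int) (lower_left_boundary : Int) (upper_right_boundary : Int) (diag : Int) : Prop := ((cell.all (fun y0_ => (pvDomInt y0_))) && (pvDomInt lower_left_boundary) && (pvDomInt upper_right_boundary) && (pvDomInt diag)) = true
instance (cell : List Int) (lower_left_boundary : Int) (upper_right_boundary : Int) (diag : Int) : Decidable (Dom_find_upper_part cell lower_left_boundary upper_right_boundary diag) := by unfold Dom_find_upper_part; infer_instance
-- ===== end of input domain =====

-- B replaces A's recursion (front-concatenation on return) by an iterative loop with an accumulator; same values.


-- ===== PORT A =====
-- fuel guard (totality only): enough steps for every input Pre_ admits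
def pvFuel (r c L U : Int) : Nat := (U - r).toNat + (c - L).toNat + (U - c).toNat + 1

-- A's recursion on diag == 1: return [] at a boundary, else cons the next cell on the recursive result
def pvRecA1 : Nat → Int → Int → Int → Int → Option (List (List Int))
  | 0, _, _, _, _ => none
  | fuel+1, r, c, L, U =>
    if r = U ∨ c = L then some []
    else match pvRecA1 fuel (r+1) (c-1) L U with
      | none => none
      | some rest => some ([r+1, c-1] :: rest)

-- A's recursion on diag == 2
def pvRecA2 : Nat → Int → Int → Int → Option (List (List Int))
  | 0, _, _, _ => none
  | fuel+1, r, c, U =>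
    if r = U ∨ c = U then some []
    else match pvRecA2 fuel (r+1) (c+1) U with
      | none => none
      | some rest => some ([r+1, c+1] :: rest)

def find_upper_part (cell : List Int) (lower_left_boundary : Int) (upper_right_boundary : Int) (diag : Int) : Option (List (List Int)) :=
  match PySem.List.pyGet? cell 0, PySem.List.pyGet? cell 1 with
  | some r, some c =>
    if diag = 1 then
      pvRecA1 (pvFuel r c lower_left_boundary upper_right_boundary) r c lower_left_boundary upper_right_boundary
    else if diag = 2 then
      pvRecA2 (pvFuel r c lower_left_boundary upper_right_boundary) r c upper_right_boundary
    else none    -- Python falls off the function: returns None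
  | _, _ => none -- IndexError: excluded by Pre_

-- ===== PORT B =====
-- B's while loop on diag == 1: append each new cell to the accumulator
def pvLoopB1 : Nat → Int → Int → Int → Int → List (List Int) → Option (List (List Int))
  | 0, _, _, _, _, _ => none
  | fuel+1, r, c, L, U, res =>
    if r ≠ U ∧ c ≠ L then pvLoopB1 fuel (r+1) (c-1) L U (res ++ [[r+1, c-1]])
    else some res

-- B's while loop on diag == 2
def pvLoopB2 : Nat → Int → Int → Int → List (List Int) → Option (List (List Int))
  | 0, _, _, _, _ => none
  | fuel+1, r, c, U, res =>
    if r ≠ U ∧ c ≠ U then pvLoopB2 fuel (r+1) (c+1) U (res ++ [[r+1, c+1]])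
    else some res

def find_upper_part_alt (cell : List Int) (lower_left_boundary : Int) (upper_right_boundary : Int) (diag : Int) : Option (List (List Int)) :=
  match PySem.List.pyGet? cell 0 with
  | none => none -- IndexError: excluded by Pre_
  | some r =>
    match PySem.List.pyGet? cell 1 with
    | none => none -- IndexError: excluded by Pre_
    | some c =>
      if diag = 1 then
        pvLoopB1 (pvFuel r c lower_left_boundary upper_right_boundary) r c lower_left_boundary upper_right_boundary []
      else if diag = 2 then
        pvLoopB2 (pvFuel r c lower_left_boundary upper_right_boundary) r c upper_right_boundary []
      else none

-- ===== PRECONDITION & SPEC =====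
-- Pre_ excludes exactly the inputs where Python A raises: cells shorter than 2 (IndexError) and the
-- diverging diagonals where neither boundary is ever reached (RecursionError).
def Pre_find_upper_part (cell : List Int) (lower_left_boundary : Int) (upper_right_boundary : Int) (diag : Int) : Prop :=
  2 ≤ cell.length ∧
  (diag = 1 → cell.getD 0 0 ≤ upper_right_boundary ∨ lower_left_boundary ≤ cell.getD 1 0) ∧
  (diag = 2 → cell.getD 0 0 ≤ upper_right_boundary ∨ cell.getD 1 0 ≤ upper_right_boundary)
instance (cell : List Int) (lower_left_boundary : Int) (upper_right_boundary : Int) (diag : Int) : Decidable (Pre_find_upper_part cell lower_left_boundary upper_right_boundary diag) := by unfold Pre_find_upper_part; infer_instance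
def pvWitness_find_upper_part : List Int × Int × Int × Int := ([2, 3], 0, 7, 1)

def Spec_find_upper_part (cell : List Int) (lower_left_boundary : Int) (upper_right_boundary : Int) (diag : Int) (out : Option (List (List Int))) : Prop := out = find_upper_part_alt cell lower_left_boundary upper_right_boundary diag
instance (cell : List Int) (lower_left_boundary : Int) (upper_right_boundary : Int) (diag : Int) (out : Option (List (List Int))) : Decidable (Spec_find_upper_part cell lower_left_boundary upper_right_boundary diag out) := by unfold Spec_find_upper_part; infer_instance

-- ===== CLAIM (what is proved, stated in full; the proofs are below) =====
def Claim_equal_find_upper_part : Prop := ∀ (cell : List Int) (lower_left_boundary : Int) (upper_right_boundary : Int) (diag : Int), Dom_find_upper_part cell lower_left_boundary upper_right_boundary diag → Pre_find_upper_part cell lower_left_boundary upper_right_boundary diag → Spec_find_upper_part cell lower_left_boundary upper_right_boundary diag (find_upper_part cell lower_left_boundary upper_right_boundary diag)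

-- ===== LEMMAS AND PROOFS =====
theorem loop1_eq_rec1 (fuel : Nat) : ∀ (r c L U : Int) (res : List (List Int)),
    pvLoopB1 fuel r c L U res = (pvRecA1 fuel r c L U).map (res ++ ·) := by
  induction fuel with
  | zero => intro r c L U res; rfl
  | succ n ih =>
    intro r c L U res
    simp only [pvLoopB1, pvRecA1]
    by_cases h : r = U ∨ c = L
    · rcases h with h | h <;> simp [h]
    · rw [not_or] at h
      simp only [if_pos h, if_neg (by tauto : ¬ (r = U ∨ c = L)), ih]
      cases pvRecA1 n (r+1) (c-1) L U <;> simp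

theorem loop2_eq_rec2 (fuel : Nat) : ∀ (r c U : Int) (res : List (List Int)),
    pvLoopB2 fuel r c U res = (pvRecA2 fuel r c U).map (res ++ ·) := by
  induction fuel with
  | zero => intro r c U res; rfl
  | succ n ih =>
    intro r c U res
    simp only [pvLoopB2, pvRecA2]
    by_cases h : r = U ∨ c = U
    · rcases h with h | h <;> simp [h]
    · rw [not_or] at h
      simp only [if_pos h, if_neg (by tauto : ¬ (r = U ∨ c = U)), ih]
      cases pvRecA2 n (r+1) (c+1) U <;> simp

-- ===== VERDICT (by name: the statement is the Claim_ definition above) =====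
theorem find_upper_part_spec : Claim_equal_find_upper_part := by
  intro cell L U diag _ _
  unfold Spec_find_upper_part find_upper_part find_upper_part_alt
  cases h0 : PySem.List.pyGet? cell 0 <;> cases h1 : PySem.List.pyGet? cell 1 <;> try rfl
  rename_i r c
  by_cases hd1 : diag = 1
  · simp [hd1, loop1_eq_rec1]
  · by_cases hd2 : diag = 2
    · simp [hd2, loop2_eq_rec2]
    · simp [hd1, hd2]
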